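-- pv_equiv track=rewrite | github.com/ybao2000/summer_python_basics | temp/print_calendar_2.py | save_month_lines
-- ===== SOURCE A (Python) =====
-- def save_month_lines(indent, number):
--   lines = []
--   line = '   ' * indent
--   for i in range(1, number+1):
--     line += f"{i:2d} "
--     if (i+indent) % 7 == 0:
--       lines.append(line)
--       line = ''
--   if line:   # simplified of len(line) > 0
--     line = line + ' ' * (21-len(line))   # to make line as a full line (21 characters)
--     lines.append(line)
--
--   return lines
-- ===== SOURCE B (Python) =====
-- def save_month_lines(indent, number):
--     lines = []
--     start = 1
--     prefix = '   ' * indent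
--     while start <= number:
--         # last day of the current calendar week (capped at the month's end)
--         stop = min(number, start + 6 - (start + indent - 1) % 7)
--         line = prefix + ''.join(f"{i:2d} " for i in range(start, stop + 1))
--         if stop == number and (number + indent) % 7 != 0:
--             line = line.ljust(21)
--         lines.append(line)
--         prefix = ''
--         start = stop + 1
--     return lines
-- ===== Notes on version B (the rewrite author's own statement) =====
-- stated objective: alternative
-- what changed: B replaces A's day-by-day loop (accumulating a line buffer and flushing on (i+indent)%7==0) with a week-by-week loop that computes each week's last day arithmetically, joins that week's formatted cells in one shot, and pads only the trailing partial line via ljust.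
-- intended difference: On empty months (number < 1) with indent >= 1, A returns one all-blank padded line (its leftover indent buffer is flushed although no day was printed), while B returns [] since a month with no days has no week lines, which is the intended output. — e.g. on save_month_lines(1, 0): A returns [" "], B returns []
import Mathlib
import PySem

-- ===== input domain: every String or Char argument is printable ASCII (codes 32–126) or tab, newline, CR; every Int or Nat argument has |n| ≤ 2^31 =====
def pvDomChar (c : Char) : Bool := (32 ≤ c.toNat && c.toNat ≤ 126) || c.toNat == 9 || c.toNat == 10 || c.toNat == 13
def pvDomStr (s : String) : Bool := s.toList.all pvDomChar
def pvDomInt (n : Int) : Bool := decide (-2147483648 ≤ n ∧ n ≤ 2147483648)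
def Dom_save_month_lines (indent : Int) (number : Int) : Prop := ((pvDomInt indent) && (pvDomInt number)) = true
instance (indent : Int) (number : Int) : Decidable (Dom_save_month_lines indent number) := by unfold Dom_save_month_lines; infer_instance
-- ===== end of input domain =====

-- B rebuilds the calendar week by week (computing each week's last day arithmetically and
-- joining that week's formatted cells) instead of A's day-by-day accumulator loop;
-- objective: alternative decomposition, same cost.

-- ===== PORT A =====

-- f"{i:2d} " : right-align str(i) in width 2 with spaces, then one trailing space (both Pythons use it)
def pvCell (i : Int) : List Char :=
  let s := PySem.Int.toChars i
  List.replicate (2 - s.length) ' ' ++ s ++ [' ']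

-- one step of A's for-loop body, state = (lines, line)
def pvStepA (indent : Int) (st : List String × List Char) (i : Int) : List String × List Char :=
  let line := st.2 ++ pvCell i
  if PySem.Int.mod (i + indent) 7 = 0 then (st.1 ++ [String.ofList line], []) else (st.1, line)

def save_month_lines (indent : Int) (number : Int) : List String :=
  -- line = '   ' * indent  (3·indent spaces; empty for indent ≤ 0)
  let st := (PySem.List.pyRange 1 (number + 1) 1).foldl (pvStepA indent)
              (([] : List String), List.replicate (3 * indent).toNat ' ')
  if st.2 = [] then st.1
  else st.1 ++ [String.ofList (st.2 ++ List.replicate (21 - st.2.length) ' ')]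

-- ===== PORT B =====

-- ''.join(f"{i:2d} " for i in range(a, b))
def pvCells (a b : Int) : List Char := ((PySem.List.pyRange a b 1).map pvCell).flatten

-- s.ljust(21)
def pvLjust21 (s : List Char) : List Char := s ++ List.replicate (21 - s.length) ' '

-- Source B's while-loop: emit one line per calendar week, the blank prefix only on the first
-- (fuel = the number of remaining days, a totality guard only: each iteration handles ≥ 1 day)
def pvWeeks (indent number : Int) : Nat → Int → List Char → List String
  | 0, _, _ => []
  | fuel + 1, start, pre =>
    if start ≤ number then
      let stop := min number (start + 6 - PySem.Int.mod (start + indent - 1) 7)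
      let line := pre ++ pvCells start (stop + 1)
      let line := if stop = number ∧ PySem.Int.mod (number + indent) 7 ≠ 0 then pvLjust21 line else line
      String.ofList line :: pvWeeks indent number fuel (stop + 1) []
    else []

def save_month_lines_alt (indent : Int) (number : Int) : List String :=
  pvWeeks indent number number.toNat 1 (List.replicate (3 * indent).toNat ' ')

-- ===== PRECONDITION & SPEC =====

-- On empty months (number < 1) with indent ≥ 1, A returns one all-blank padded line (its
-- leftover indent buffer is flushed although no day was printed), while B returns [] since a
-- month with no days has no week lines, which is the intended output.
def D_save_month_lines (indent : Int) (number : Int) : Prop := number < 1 ∧ 1 ≤ indent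
instance (indent : Int) (number : Int) : Decidable (D_save_month_lines indent number) := by unfold D_save_month_lines; infer_instance

def Spec_save_month_lines (indent : Int) (number : Int) (out : List String) : Prop :=
  ¬ D_save_month_lines indent number → out = save_month_lines_alt indent number
instance (indent : Int) (number : Int) (out : List String) : Decidable (Spec_save_month_lines indent number out) := by unfold Spec_save_month_lines; infer_instance

def pvDiffWitness_save_month_lines : Int × Int := (1, 0)
def pvDiffWitnessOut_save_month_lines : (List String) × (List String) :=
  (["                     "], [])

-- ===== CLAIM (what is proved, stated in full; the proofs are below) =====
def Claim_unchanged_save_month_lines : Prop := ∀ (indent : Int) (number : Int), Dom_save_month_lines indent number → Spec_save_month_lines indent number (save_month_lines indent number)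
def Claim_changed_save_month_lines : Prop := Dom_save_month_lines (pvDiffWitness_save_month_lines.1) (pvDiffWitness_save_month_lines.2) ∧ D_save_month_lines (pvDiffWitness_save_month_lines.1) (pvDiffWitness_save_month_lines.2) ∧ save_month_lines (pvDiffWitness_save_month_lines.1) (pvDiffWitness_save_month_lines.2) = pvDiffWitnessOut_save_month_lines.1 ∧ save_month_lines_alt (pvDiffWitness_save_month_lines.1) (pvDiffWitness_save_month_lines.2) = pvDiffWitnessOut_save_month_lines.2 ∧ pvDiffWitnessOut_save_month_lines.1 ≠ pvDiffWitnessOut_save_month_lines.2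
def Claim_exact_save_month_lines : Prop := ∀ (indent : Int) (number : Int), Dom_save_month_lines indent number → D_save_month_lines indent number → save_month_lines indent number ≠ save_month_lines_alt indent number

-- ===== LEMMAS AND PROOFS =====

-- A's finishing step applied to a fold that starts at `start` with buffer `pre`
def pvAfin (indent number start : Int) (pre : List Char) : List String :=
  if ((PySem.List.pyRange start (number + 1) 1).foldl (pvStepA indent) (([] : List String), pre)).2 = []
  then ((PySem.List.pyRange start (number + 1) 1).foldl (pvStepA indent) (([] : List String), pre)).1
  else ((PySem.List.pyRange start (number + 1) 1).foldl (pvStepA indent) (([] : List String), pre)).1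
       ++ [String.ofList (pvLjust21 ((PySem.List.pyRange start (number + 1) 1).foldl (pvStepA indent) (([] : List String), pre)).2)]

-- one unfolding step of pvWeeks for start ≤ number
theorem pvWeeks_step (indent number start : Int) (fuel : Nat) (pre : List Char) (h : start ≤ number) :
    pvWeeks indent number (fuel + 1) start pre
      = String.ofList
          (if min number (start + 6 - PySem.Int.mod (start + indent - 1) 7) = number ∧
              PySem.Int.mod (number + indent) 7 ≠ 0
           then pvLjust21 (pre ++ pvCells start (min number (start + 6 - PySem.Int.mod (start + indent - 1) 7) + 1))
           else pre ++ pvCells start (min number (start + 6 - PySem.Int.mod (start + indent - 1) 7) + 1))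
        :: pvWeeks indent number fuel (min number (start + 6 - PySem.Int.mod (start + indent - 1) 7) + 1) [] := by
  rw [pvWeeks, if_pos h]

theorem pvStepA_split (indent : Int) (days : List Int) :
    ∀ (ls : List String) (l : List Char),
      days.foldl (pvStepA indent) (ls, l)
        = (ls ++ (days.foldl (pvStepA indent) ([], l)).1, (days.foldl (pvStepA indent) ([], l)).2) := by
  induction days with
  | nil => intro ls l; simp
  | cons d ds ih =>
    intro ls l
    simp only [List.foldl_cons]
    by_cases hf : PySem.Int.mod (d + indent) 7 = 0
    · simp only [pvStepA, hf, if_pos]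
      rw [ih (ls ++ [String.ofList (l ++ pvCell d)]) [], ih ([] ++ [String.ofList (l ++ pvCell d)]) []]
      simp
    · simp only [pvStepA, hf, if_neg, not_false_iff]
      exact ih ls (l ++ pvCell d)

theorem pvCell_ne_nil (i : Int) : pvCell i ≠ [] := by
  simp [pvCell]

-- fold over one week's chunk: no flush strictly before `stop`, possibly a flush at `stop`
theorem pvChunk (indent : Int) :
    ∀ (k : Nat) (start stop : Int), start ≤ stop → (stop - start).toNat = k →
    (∀ i : Int, start ≤ i → i < stop → PySem.Int.mod (i + indent) 7 ≠ 0) →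
    ∀ pre : List Char,
      (PySem.List.pyRange start (stop + 1) 1).foldl (pvStepA indent) (([] : List String), pre)
        = if PySem.Int.mod (stop + indent) 7 = 0
          then ([String.ofList (pre ++ pvCells start (stop + 1))], [])
          else ([], pre ++ pvCells start (stop + 1)) := by
  intro k
  induction k with
  | zero =>
    intro start stop hs hk _ pre
    have : start = stop := by omega
    subst this
    rw [PySem.List.pyRange_one_singleton]
    simp only [List.foldl_cons, List.foldl_nil, pvStepA, pvCells, PySem.List.pyRange_one_singleton,
      List.map_cons, List.map_nil, List.flatten]
    split_ifs <;> simp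
  | succ k ih =>
    intro start stop hs hk hmid pre
    have hlt : start < stop := by omega
    rw [PySem.List.pyRange_one_cons (by omega : start < stop + 1)]
    simp only [List.foldl_cons, pvStepA, hmid start le_rfl hlt, if_neg, not_false_iff]
    rw [ih (start + 1) stop (by omega) (by omega) (fun i h1 h2 => hmid i (by omega) h2) (pre ++ pvCell start)]
    have hc : pvCells start (stop + 1) = pvCell start ++ pvCells (start + 1) (stop + 1) := by
      simp [pvCells, PySem.List.pyRange_one_cons (by omega : start < stop + 1)]
    rw [hc]
    split_ifs <;> simp

theorem pvWeeks_nil (indent number start : Int) (fuel : Nat) (pre : List Char)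
    (h : ¬ start ≤ number) : pvWeeks indent number fuel start pre = [] := by
  cases fuel with
  | zero => rfl
  | succ f => rw [pvWeeks, if_neg h]

theorem pvMain (indent number : Int) :
    ∀ (k : Nat) (start : Int), (number + 1 - start).toNat ≤ k → ∀ pre,
      pvAfin indent number start pre
      = pvWeeks indent number k start pre
        ++ (if number < start ∧ pre ≠ [] then [String.ofList (pvLjust21 pre)] else []) := by
  intro k
  induction k with
  | zero =>
    intro start hk pre
    have hgt : number < start := by omega
    unfold pvAfin
    rw [PySem.List.pyRange_one_eq_nil (by omega), pvWeeks_nil _ _ _ _ _ (by omega)]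
    simp only [List.foldl_nil]
    by_cases hp : pre = [] <;> simp [hp, hgt]
  | succ k ih =>
    intro start hk pre
    by_cases hsn : start ≤ number
    case neg =>
      unfold pvAfin
      rw [PySem.List.pyRange_one_eq_nil (by omega), pvWeeks_nil _ _ _ _ _ hsn]
      simp only [List.foldl_nil]
      by_cases hp : pre = [] <;> simp [hp, show number < start by omega]
    case pos =>
      have hr0 : 0 ≤ PySem.Int.mod (start + indent - 1) 7 :=
        PySem.Int.mod_nonneg _ (by norm_num)
      have hr7 : PySem.Int.mod (start + indent - 1) 7 < 7 :=
        PySem.Int.mod_lt _ (by norm_num)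
      set brk : Int := start + 6 - PySem.Int.mod (start + indent - 1) 7 with hbrk
      set stop : Int := min number brk with hstop
      have hch : stop = number ∨ stop = brk := min_choice number brk
      have hle1 : stop ≤ number := min_le_left number brk
      have hle2 : stop ≤ brk := min_le_right number brk
      have hs1 : start ≤ stop := by omega
      have hdvd : (7:Int) ∣ brk + indent := by
        have hq := PySem.Int.floordiv_mul_add_mod (start + indent - 1) 7
        exact ⟨PySem.Int.floordiv (start + indent - 1) 7 + 1, by omega⟩
      have hmodbrk : PySem.Int.mod (brk + indent) 7 = 0 :=
        (PySem.Int.mod_eq_zero_iff_dvd _ _).2 hdvd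
      have hmid : ∀ i : Int, start ≤ i → i < stop → PySem.Int.mod (i + indent) 7 ≠ 0 := by
        intro i h1 h2 hmod
        have hd2 : (7:Int) ∣ i + indent := (PySem.Int.mod_eq_zero_iff_dvd _ _).1 hmod
        have hd3 : (7:Int) ∣ (brk + indent) - (i + indent) := dvd_sub hdvd hd2
        have hle : (7:Int) ≤ (brk + indent) - (i + indent) := Int.le_of_dvd (by omega) hd3
        omega
      unfold pvAfin
      rw [PySem.List.pyRange_one_append start (stop + 1) (number + 1) (by omega) (by omega),
        List.foldl_append,
        pvChunk indent (stop - start).toNat start stop hs1 rfl hmid pre]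
      conv_rhs => rw [pvWeeks_step indent number start k pre hsn]
      rw [← hstop]
      rw [if_neg (by omega : ¬(number < start ∧ pre ≠ [])), List.append_nil]
      by_cases hb : PySem.Int.mod (stop + indent) 7 = 0
      · rw [if_pos hb,
          pvStepA_split indent _ [String.ofList (pre ++ pvCells start (stop + 1))] []]
        have hrec := ih (stop + 1) (by omega) []
        unfold pvAfin at hrec
        rw [if_neg (by simp : ¬(number < stop + 1 ∧ ([] : List Char) ≠ [])),
          List.append_nil] at hrec
        have hcond : ¬(stop = number ∧ PySem.Int.mod (number + indent) 7 ≠ 0) := by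
          rintro ⟨h1, h2⟩; rw [h1] at hb; exact h2 hb
        rw [if_neg hcond, ← hrec]
        by_cases h2 : (List.foldl (pvStepA indent) ([], ([] : List Char))
            (PySem.List.pyRange (stop + 1) (number + 1) 1)).2 = [] <;>
          simp only [h2, if_pos, if_neg, not_false_iff] <;> simp
      · rw [if_neg hb]
        have hstopn : stop = number := by
          rcases hch with h | h
          · exact h
          · exact absurd (h ▸ hmodbrk) hb
        have hmodn : PySem.Int.mod (number + indent) 7 ≠ 0 := hstopn ▸ hb
        rw [PySem.List.pyRange_one_eq_nil (by omega)]
        simp only [List.foldl_nil]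
        have hcne : pvCells start (stop + 1) ≠ [] := by
          rw [pvCells, PySem.List.pyRange_one_cons (by omega : start < stop + 1)]
          simp [pvCell_ne_nil]
        rw [if_neg (by simp [hcne] : ¬(pre ++ pvCells start (stop + 1) = ([] : List Char)))]
        conv_rhs => rw [pvWeeks_nil _ _ _ _ _ (by omega : ¬ stop + 1 ≤ number)]
        rw [if_pos ⟨hstopn, hmodn⟩]
        simp

-- A, rewritten through pvAfin (definitional) and pvMain
theorem pvA_eq (indent number : Int) :
    save_month_lines indent number
      = save_month_lines_alt indent number
        ++ (if number < 1 ∧ 1 ≤ indent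
            then [String.ofList (pvLjust21 (List.replicate (3 * indent).toNat ' '))] else []) := by
  have h := pvMain indent number number.toNat 1 (by omega) (List.replicate (3 * indent).toNat ' ')
  unfold pvAfin at h
  show save_month_lines indent number = _
  unfold save_month_lines save_month_lines_alt
  simp only [pvLjust21] at h ⊢
  rw [h]
  have he : (List.replicate (3 * indent).toNat ' ' ≠ ([] : List Char)) ↔ 0 < indent := by
    rw [ne_eq, List.replicate_eq_nil_iff]; omega
  by_cases h1 : number < 1 <;> by_cases h2 : 0 < indent <;>
    simp [h1, h2, he, show (1 ≤ indent) ↔ (0 < indent) from by omega]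

-- ===== VERDICT (by name: the statement is the Claim_ definition above) =====
theorem save_month_lines_spec : Claim_unchanged_save_month_lines := by
  intro indent number _ hD
  unfold D_save_month_lines at hD
  rw [pvA_eq, if_neg hD]
  simp

theorem save_month_lines_changed : Claim_changed_save_month_lines := by
  unfold Claim_changed_save_month_lines
  refine ⟨by decide, by decide, ?_, by decide, by decide⟩
  show save_month_lines 1 0 = ["                     "]
  rw [pvA_eq, if_pos (by norm_num)]
  decide

theorem save_month_lines_tight : Claim_exact_save_month_lines := by
  intro indent number _ hD
  obtain ⟨h1, h2⟩ := hD
  rw [pvA_eq, if_pos ⟨h1, h2⟩]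
  unfold save_month_lines_alt
  rw [show number.toNat = 0 from by omega]
  simp [pvWeeks]
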